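-- pv_equiv track=rewrite | github.com/mohki890/Danny-Huang | leetcode_py3/Medium 376. Wiggle Subsequence.py | wiggleMaxLength2
-- ===== SOURCE A (Python) =====
-- from typing import List
--
-- def wiggleMaxLength2(nums: List[int]) -> int:
--     if len(nums) < 2:
--         return len(nums)
--     up = [0 for _ in range(len(nums))]
--     down = [0 for _ in range(len(nums))]
--     for i in range(1, len(nums)):
--         if nums[i] > nums[i - 1]:
--             up[i] = up[i - 1]
--             down[i] = up[i - 1] + 1
--         elif nums[i] < nums[i - 1]:
--             up[i] = down[i - 1] + 1
--             down[i] = down[i - 1]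
--         else:
--             up[i] = up[i - 1]
--             down[i] = down[i - 1]
--     return max(up[-1], down[-1]) + 1
-- ===== SOURCE B (Python) =====
-- from typing import List
--
-- def wiggleMaxLength2(nums: List[int]) -> int:
--     if len(nums) < 2:
--         return len(nums)
--     count = 1
--     prevdiff = 0
--     for prev, cur in zip(nums, nums[1:]):
--         diff = cur - prev
--         if (diff > 0 and prevdiff <= 0) or (diff < 0 and prevdiff >= 0):
--             count += 1
--             prevdiff = diff
--     return count
-- ===== Notes on version B (the rewrite author's own statement) =====
-- stated objective: simpler
-- what changed: Replaces the two parallel up/down DP arrays with the one-pass greedy sign-change count over adjacent pairs (count=1, prevdiff=0; bump count when the difference's sign flips), using O(1) state instead of two O(n) arrays and no per-index list writes.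
import Mathlib
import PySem

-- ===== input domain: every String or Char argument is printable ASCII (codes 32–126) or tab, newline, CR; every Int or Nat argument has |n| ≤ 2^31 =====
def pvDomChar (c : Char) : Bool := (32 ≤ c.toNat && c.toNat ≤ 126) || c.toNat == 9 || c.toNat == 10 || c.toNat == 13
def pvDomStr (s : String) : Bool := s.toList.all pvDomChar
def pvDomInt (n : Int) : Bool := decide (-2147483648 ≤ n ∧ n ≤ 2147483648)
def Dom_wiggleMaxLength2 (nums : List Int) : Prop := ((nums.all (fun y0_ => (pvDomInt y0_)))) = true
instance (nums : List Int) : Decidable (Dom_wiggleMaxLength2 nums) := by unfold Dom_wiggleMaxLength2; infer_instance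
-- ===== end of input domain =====

-- B replaces A's two parallel up/down DP arrays by the greedy one-pass sign-change count over
-- adjacent pairs (objective: simpler; same O(n) time, O(1) instead of O(n) space).

-- ===== PORT A =====
-- loop body of A: i-th iteration reads nums[i], nums[i-1] and writes up[i], down[i]
def stepA (nums : List Int) (st : List Int × List Int) (i : Int) : List Int × List Int :=
  let up := st.1
  let down := st.2
  if PySem.List.pyGetD nums (i - 1) 0 < PySem.List.pyGetD nums i 0 then
    (PySem.List.pySetD up i (PySem.List.pyGetD up (i - 1) 0),
     PySem.List.pySetD down i (PySem.List.pyGetD up (i - 1) 0 + 1))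
  else if PySem.List.pyGetD nums i 0 < PySem.List.pyGetD nums (i - 1) 0 then
    (PySem.List.pySetD up i (PySem.List.pyGetD down (i - 1) 0 + 1),
     PySem.List.pySetD down i (PySem.List.pyGetD down (i - 1) 0))
  else
    (PySem.List.pySetD up i (PySem.List.pyGetD up (i - 1) 0),
     PySem.List.pySetD down i (PySem.List.pyGetD down (i - 1) 0))

def wiggleMaxLength2 (nums : List Int) : Int :=
  if nums.length < 2 then (nums.length : Int)
  else
    let up := (PySem.List.pyRange 0 nums.length 1).map (fun _ => (0 : Int))
    let down := (PySem.List.pyRange 0 nums.length 1).map (fun _ => (0 : Int))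
    let st := (PySem.List.pyRange 1 nums.length 1).foldl (stepA nums) (up, down)
    max (PySem.List.pyGetD st.1 (-1) 0) (PySem.List.pyGetD st.2 (-1) 0) + 1

-- ===== PORT B =====
-- loop body of B: state is (count, prevdiff), pc is the pair (prev, cur)
def stepB (st : Int × Int) (pc : Int × Int) : Int × Int :=
  let diff := pc.2 - pc.1
  if (0 < diff ∧ st.2 ≤ 0) ∨ (diff < 0 ∧ 0 ≤ st.2) then (st.1 + 1, diff) else st

def wiggleMaxLength2_alt (nums : List Int) : Int :=
  if nums.length < 2 then (nums.length : Int)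
  else
    ((nums.zip (PySem.List.slice nums (some 1) none)).foldl stepB (1, 0)).1

-- ===== PRECONDITION & SPEC =====
def Spec_wiggleMaxLength2 (nums : List Int) (out : Int) : Prop := out = wiggleMaxLength2_alt nums
instance (nums : List Int) (out : Int) : Decidable (Spec_wiggleMaxLength2 nums out) := by unfold Spec_wiggleMaxLength2; infer_instance

-- ===== CLAIM (what is proved, stated in full; the proofs are below) =====
def Claim_equal_wiggleMaxLength2 : Prop := ∀ (nums : List Int), Dom_wiggleMaxLength2 nums → Spec_wiggleMaxLength2 nums (wiggleMaxLength2 nums)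

-- ===== LEMMAS AND PROOFS =====

-- scalar model of A's loop body: (u, d) = (up[i], down[i]) as functions of (up[i-1], down[i-1])
def sA (st : Int × Int) (p : Int × Int) : Int × Int :=
  if p.1 < p.2 then (st.1, st.1 + 1) else if p.2 < p.1 then (st.2 + 1, st.2) else st

-- the invariant coupling A's DP state with B's greedy state
def RelAB (u d c pd : Int) : Prop :=
  (pd = 0 ∧ u = 0 ∧ d = 0 ∧ c = 1) ∨ (0 < pd ∧ d = c - 1 ∧ u = c - 2) ∨ (pd < 0 ∧ u = c - 1 ∧ d = c - 2)

lemma rel_key : ∀ (l : List (Int × Int)) (u d c pd : Int), RelAB u d c pd →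
    RelAB (l.foldl sA (u, d)).1 (l.foldl sA (u, d)).2
        (l.foldl stepB (c, pd)).1 (l.foldl stepB (c, pd)).2 := by
  intro l
  induction l with
  | nil => intro u d c pd h; exact h
  | cons p rest ih =>
    intro u d c pd h
    simp only [List.foldl_cons, sA, stepB]
    rcases h with ⟨h0, hu, hd, hc⟩ | ⟨h0, hd, hu⟩ | ⟨h0, hu, hd⟩ <;>
      split_ifs <;> (apply ih; unfold RelAB; omega)

lemma rel_max (u d c pd : Int) (h : RelAB u d c pd) : max u d + 1 = c := by
  rcases h with ⟨_, hu, hd, hc⟩ | ⟨_, hd, hu⟩ | ⟨_, hu, hd⟩ <;> omega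

-- the list of adjacent pairs that both loops traverse
def pairs (nums : List Int) : List (Int × Int) := nums.zip nums.tail

lemma pairs_getElem (nums : List Int) (m : Nat) (h : m + 1 < nums.length) :
    (pairs nums)[m]'(by simp [pairs, List.length_zip]; omega) = (nums[m]'(by omega), nums[m+1]'h) := by
  simp [pairs, List.getElem_zip, List.getElem_tail]

-- A's array loop, characterised: after the iterations for i = 1 .. m, both arrays still have
-- length n, and the pair (up[m], down[m]) is the sA-fold of the first m adjacent pairs.
lemma A_loop (nums : List Int) (z : List Int) (hz : z.length = nums.length)
    (hz0 : ∀ i : Nat, i < nums.length → z.getD i 0 = 0)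
    (m : Nat) (hm : m < nums.length) :
    let st := (PySem.List.pyRange 1 (1 + m) 1).foldl (stepA nums) (z, z)
    st.1.length = nums.length ∧ st.2.length = nums.length ∧
      (PySem.List.pyGetD st.1 (m : Int) 0, PySem.List.pyGetD st.2 (m : Int) 0)
        = ((pairs nums).take m).foldl sA (0, 0) := by
  induction m with
  | zero =>
    have h0 := hz0 0 hm
    rw [List.getD_eq_getElem?_getD] at h0
    simp [PySem.List.pyRange_one_eq_nil, hz, PySem.List.pyGetD_zero, h0]
  | succ m ih =>
    intro st
    obtain ⟨h1, h2, h3⟩ := ih (by omega)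
    have hrange : PySem.List.pyRange 1 (1 + (m + 1 : Nat)) 1
        = PySem.List.pyRange 1 (1 + m) 1 ++ [1 + (m : Int)] := by
      have := PySem.List.pyRange_one_succ_right (a := 1) (b := 1 + (m : Int)) (by omega)
      push_cast
      rw [← this]
      ring_nf
    set prev := (PySem.List.pyRange 1 (1 + (m : Int)) 1).foldl (stepA nums) (z, z) with hprev
    have hst : st = stepA nums prev (1 + (m : Int)) := by
      show (PySem.List.pyRange 1 (1 + (m + 1 : Nat)) 1).foldl (stepA nums) (z, z) = _
      rw [hrange, List.foldl_append]
      rfl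
    have hi1 : (1 + (m : Int)) - 1 = (m : Int) := by ring
    have hnm : PySem.List.pyGetD nums (1 + (m : Int)) 0 = nums[m + 1]'hm := by
      have : (1 + (m : Int)) = ((m + 1 : Nat) : Int) := by push_cast; ring
      rw [this, PySem.List.pyGetD_natCast, List.getD_eq_getElem _ _ hm]
    have hnm' : PySem.List.pyGetD nums ((m : Int)) 0 = nums[m]'(by omega) := by
      rw [PySem.List.pyGetD_natCast, List.getD_eq_getElem _ _ (by omega)]
    have htake : (pairs nums).take (m + 1)
        = (pairs nums).take m ++ [(nums[m]'(by omega), nums[m+1]'hm)] := by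
      have hlen : m < (pairs nums).length := by simp [pairs, List.length_zip]; omega
      rw [List.take_add_one, List.getElem?_eq_getElem hlen, pairs_getElem nums m hm]
      simp
    have hset : ∀ (l : List Int) (v : Int), l.length = nums.length →
        PySem.List.pySetD l (1 + (m : Int)) v
          = l.set (m + 1) v := by
      intro l v hl
      have : (1 + (m : Int)) = ((m + 1 : Nat) : Int) := by push_cast; ring
      rw [this, PySem.List.pySetD_natCast]
    have hget : ∀ (l : List Int) (v : Int), l.length = nums.length →
        PySem.List.pyGetD (l.set (m + 1) v) (1 + (m : Int)) 0 = v := by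
      intro l v hl
      have hc : (1 + (m : Int)) = ((m + 1 : Nat) : Int) := by push_cast; ring
      rw [hc, PySem.List.pyGetD_natCast, List.getD_eq_getElem _ _ (by simp [hl]; omega)]
      simp [List.getElem_set_self]
    rw [hst]
    unfold stepA
    simp only [hi1, hnm, hnm']
    rw [htake, List.foldl_append]
    rcases h3' : ((pairs nums).take m).foldl sA (0, 0) with ⟨u, d⟩
    rw [h3'] at h3
    have hu : PySem.List.pyGetD prev.1 ((m : Int)) 0 = u := by
      have := congrArg Prod.fst h3; simpa using this
    have hd : PySem.List.pyGetD prev.2 ((m : Int)) 0 = d := by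
      have := congrArg Prod.snd h3; simpa using this
    simp only [List.foldl_cons, List.foldl_nil, sA]
    split_ifs with hlt hgt <;>
      simp only [hu, hd, hset prev.1 _ h1, hset prev.2 _ h2] <;>
      refine ⟨by simp [h1], by simp [h2], ?_⟩
    all_goals
      have hc : ((m + 1 : Nat) : Int) = 1 + (m : Int) := by push_cast; ring
      rw [hc, hget _ _ h1, hget _ _ h2]

lemma zeros_spec (nums : List Int) :
    ((PySem.List.pyRange 0 nums.length 1).map (fun _ => (0 : Int))).length = nums.length ∧
    ∀ i : Nat, i < nums.length →
      ((PySem.List.pyRange 0 nums.length 1).map (fun _ => (0 : Int))).getD i 0 = 0 := by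
  constructor
  · simp [PySem.List.length_pyRange_one]
  · intro i hi
    have hlen : i < ((PySem.List.pyRange 0 nums.length 1).map (fun _ => (0 : Int))).length := by
      simp [PySem.List.length_pyRange_one]; omega
    rw [List.getD_eq_getElem _ _ hlen]
    simp

lemma pairs_eq_zip_slice (nums : List Int) :
    nums.zip (PySem.List.slice nums (some 1) none) = pairs nums := by
  have : PySem.List.slice nums (some ((1 : Nat) : Int)) none = nums.drop 1 :=
    PySem.List.slice_from_natCast nums 1
  simpa [pairs, ← List.drop_one] using congrArg (nums.zip ·) this

lemma take_pairs_all (nums : List Int) :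
    (pairs nums).take (nums.length - 1) = pairs nums := by
  apply List.take_of_length_le
  simp [pairs, List.length_zip]

-- ===== VERDICT (by name: the statement is the Claim_ definition above) =====
theorem wiggleMaxLength2_spec : Claim_equal_wiggleMaxLength2 := by
  intro nums _
  unfold Spec_wiggleMaxLength2 wiggleMaxLength2 wiggleMaxLength2_alt
  by_cases hlen : nums.length < 2
  · simp [hlen]
  · simp only [hlen, if_false]
    rw [pairs_eq_zip_slice]
    obtain ⟨hz, hz0⟩ := zeros_spec nums
    have hm : nums.length - 1 < nums.length := by omega
    obtain ⟨h1, h2, h3⟩ := A_loop nums _ hz hz0 (nums.length - 1) hm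
    have hub : (1 : Int) + ((nums.length - 1 : Nat) : Int) = (nums.length : Int) := by
      push_cast [Nat.cast_sub (by omega : 1 ≤ nums.length)]; ring
    rw [hub] at h1 h2 h3
    set st := (PySem.List.pyRange 1 (nums.length : Int) 1).foldl (stepA nums)
      ((PySem.List.pyRange 0 (nums.length : Int) 1).map (fun _ => (0 : Int)),
       (PySem.List.pyRange 0 (nums.length : Int) 1).map (fun _ => (0 : Int))) with hstdef
    have hne1 : st.1 ≠ [] := by intro h; rw [h] at h1; simp at h1; omega
    have hne2 : st.2 ≠ [] := by intro h; rw [h] at h2; simp at h2; omega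
    have hg1 : PySem.List.pyGetD st.1 (-1) 0 = PySem.List.pyGetD st.1 ((nums.length - 1 : Nat) : Int) 0 := by
      rw [PySem.List.pyGetD_neg_one st.1 0 hne1, PySem.List.pyGetD_natCast,
        List.getD_eq_getElem _ _ (by omega), List.getLast_eq_getElem]
      congr 1; omega
    have hg2 : PySem.List.pyGetD st.2 (-1) 0 = PySem.List.pyGetD st.2 ((nums.length - 1 : Nat) : Int) 0 := by
      rw [PySem.List.pyGetD_neg_one st.2 0 hne2, PySem.List.pyGetD_natCast,
        List.getD_eq_getElem _ _ (by omega), List.getLast_eq_getElem]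
      congr 1; omega
    rw [hg1, hg2]
    rw [take_pairs_all nums] at h3
    have hrel := rel_key (pairs nums) 0 0 1 0 (Or.inl ⟨rfl, rfl, rfl, rfl⟩)
    rw [← h3] at hrel
    have := rel_max _ _ _ _ hrel
    simpa using this
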